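-- pv_equiv track=rewrite | github.com/enbanbunbun123/atcoder_python | 20240525/c.py | bingo_turn
-- ===== SOURCE A (Python) =====
-- def bingo_turn(N, T, A):
--     #盤面の初期化
--     board = [[(i * N + j + 1) for j in range(N)] for i in range(N)]
--
--     #マークの初期化
--     marks = [[False] * N for _ in range(N)]
--
--     def check_bingo():
--         #横列のチェック
--         for row in marks:
--             if all(row):
--                 return True
--
--         #縦列のチェック
--         for col in range(N):
--             if all(marks[row][col] for row in range(N)):
--                 return True
--
--         #斜めのチェック
--         if all(marks[i][i] for i in range(N)):
--             return True
--         if all(marks[i][N - 1 - i] for i in range(N)):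
--             return True
--
--         return False
--
--     for turn in range(T):
--         #数字A[turn]に対応するマスに印をつける
--         num = A[turn]
--         for i in range(N):
--             for j in range(N):
--                 if board[i][j] == num:
--                     marks[i][j] = True
--
--         if check_bingo():
--             return turn + 1
--
--     return -1
-- ===== SOURCE B (Python) =====
-- def bingo_turn(N, T, A):
--     # Incremental counters: O(T + N) instead of re-scanning the board and all lines each turn.
--     rows = [0] * N
--     cols = [0] * N
--     diag = 0
--     anti = 0
--     seen = set()
--     for turn in range(T):
--         num = A[turn]
--         if 1 <= num <= N * N and num not in seen:
--             seen.add(num)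
--             i, j = divmod(num - 1, N)
--             rows[i] += 1
--             cols[j] += 1
--             if i == j:
--                 diag += 1
--             if i + j == N - 1:
--                 anti += 1
--             if rows[i] == N or cols[j] == N or diag == N or anti == N:
--                 return turn + 1
--     return -1
-- ===== Notes on version B (the rewrite author's own statement) =====
-- stated objective: faster
-- what changed: A rescans the whole N*N board to find the drawn number and re-checks every row, column and diagonal after each turn; B locates the cell by divmod arithmetic in O(1) and keeps incremental row/column/diagonal mark counters, checking only the counters touched by the new mark.
-- intended difference: On N = 0 (an empty board) with at least one turn, A returns 1 because all() over the empty diagonal is vacuously true, while B returns -1, the intended result for a board with no lines to complete. — e.g. on bingo_turn(0, 1, [5]): A returns 1, B returns -1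
-- outside the precondition, e.g. on bingo_turn(-2, 1, [1]): A returns 1, B raises IndexError; on bingo_turn(-2, 1, [5]): A returns 1, B returns -1; on bingo_turn(1, 5, [1]): A returns 1, B returns 1
import Mathlib
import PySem

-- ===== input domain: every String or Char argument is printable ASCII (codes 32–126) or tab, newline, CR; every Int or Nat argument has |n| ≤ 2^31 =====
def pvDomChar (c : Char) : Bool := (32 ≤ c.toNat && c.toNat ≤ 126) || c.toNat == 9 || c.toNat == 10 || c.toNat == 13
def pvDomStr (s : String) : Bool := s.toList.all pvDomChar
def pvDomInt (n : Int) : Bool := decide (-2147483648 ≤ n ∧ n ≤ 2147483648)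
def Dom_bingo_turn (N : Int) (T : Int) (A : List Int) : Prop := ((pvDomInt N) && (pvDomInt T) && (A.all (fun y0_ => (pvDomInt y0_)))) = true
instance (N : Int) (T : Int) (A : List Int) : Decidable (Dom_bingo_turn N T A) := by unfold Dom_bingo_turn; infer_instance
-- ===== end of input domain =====

-- B replaces A's per-turn full-board scan and full bingo re-check by a direct divmod cell
-- lookup and incremental row/column/diagonal counters, checking only completion of counters.

-- ===== PORT A =====
-- check_bingo: early-return scan of rows, columns and the two diagonals
def checkBingoA (N : Int) (marks : List (List Bool)) : Bool :=
  if marks.any (fun row => row.all (fun b => b)) then true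
  else if (PySem.List.pyRange 0 N 1).any (fun col =>
      (PySem.List.pyRange 0 N 1).all (fun row =>
        PySem.List.pyGetD (PySem.List.pyGetD marks row []) col false)) then true
  else if (PySem.List.pyRange 0 N 1).all (fun i =>
      PySem.List.pyGetD (PySem.List.pyGetD marks i []) i false) then true
  else if (PySem.List.pyRange 0 N 1).all (fun i =>
      PySem.List.pyGetD (PySem.List.pyGetD marks i []) (N - 1 - i) false) then true
  else false

-- the nested 'for i / for j: if board[i][j] == num: marks[i][j] = True' loops
def markA (N : Int) (board : List (List Int)) (num : Int) (marks : List (List Bool)) : List (List Bool) :=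
  (PySem.List.pyRange 0 N 1).foldl (fun m i =>
    (PySem.List.pyRange 0 N 1).foldl (fun m j =>
      if PySem.List.pyGetD (PySem.List.pyGetD board i []) j 0 == num then
        PySem.List.pySetD m i (PySem.List.pySetD (PySem.List.pyGetD m i []) j true)
      else m) m) marks

-- the 'for turn in range(T)' loop with its early return
def loopA (N : Int) (board : List (List Int)) (A : List Int) (marks : List (List Bool)) : List Int → Int
  | [] => -1
  | turn :: rest =>
      let num := PySem.List.pyGetD A turn 0
      let marks' := markA N board num marks
      if checkBingoA N marks' then turn + 1 else loopA N board A marks' rest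

def bingo_turn (N : Int) (T : Int) (A : List Int) : Int :=
  let board := (PySem.List.pyRange 0 N 1).map (fun i =>
    (PySem.List.pyRange 0 N 1).map (fun j => i * N + j + 1))
  let marks := (PySem.List.pyRange 0 N 1).map (fun _ => List.replicate N.toNat false)
  loopA N board A marks (PySem.List.pyRange 0 T 1)

-- ===== PORT B =====
-- the 'for turn in range(T)' loop over incremental counters
def loopB (N : Int) (A : List Int) :
    List Int → List Int → Int → Int → PySem.Set Int → List Int → Int
  | _, _, _, _, _, [] => -1
  | rows, cols, diag, anti, seen, turn :: rest =>
      let num := PySem.List.pyGetD A turn 0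
      if 1 ≤ num ∧ num ≤ N * N ∧ PySem.Set.contains seen num = false then
        let seen' := PySem.Set.add seen num
        let i := PySem.Int.floordiv (num - 1) N
        let j := PySem.Int.mod (num - 1) N
        let rows' := PySem.List.pySetD rows i (PySem.List.pyGetD rows i 0 + 1)
        let cols' := PySem.List.pySetD cols j (PySem.List.pyGetD cols j 0 + 1)
        let diag' := if i = j then diag + 1 else diag
        let anti' := if i + j = N - 1 then anti + 1 else anti
        if PySem.List.pyGetD rows' i 0 = N ∨ PySem.List.pyGetD cols' j 0 = N ∨
            diag' = N ∨ anti' = N then turn + 1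
        else loopB N A rows' cols' diag' anti' seen' rest
      else loopB N A rows cols diag anti seen rest

def bingo_turn_alt (N : Int) (T : Int) (A : List Int) : Int :=
  loopB N A (List.replicate N.toNat 0) (List.replicate N.toNat 0) 0 0
    PySem.Set.empty (PySem.List.pyRange 0 T 1)

-- ===== PRECONDITION & SPEC =====
-- Pre_ excludes negative board sizes N < 0 (outside the task's natural domain; B's counter
-- arrays are empty there and it raises where A's vacuous all() reports a bingo), and T > len(A),
-- where A in general raises IndexError (on a few such inputs an early bingo lets A return
-- before the missing index, but "raises" has no closed form short of this bound).
def Pre_bingo_turn (N : Int) (T : Int) (A : List Int) : Prop :=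
  0 ≤ N ∧ T ≤ A.length
instance (N : Int) (T : Int) (A : List Int) : Decidable (Pre_bingo_turn N T A) := by
  unfold Pre_bingo_turn; infer_instance

def pvWitness_bingo_turn : Int × Int × List Int := (2, 3, [1, 3, 2])

-- On N = 0 (an empty board) with at least one turn, A returns 1 because all() over the empty
-- diagonal is vacuously true, while B returns -1; -1 is the intended result for a board with
-- no lines to complete.
def D_bingo_turn (N : Int) (T : Int) (A : List Int) : Prop := N = 0 ∧ 1 ≤ T
instance (N : Int) (T : Int) (A : List Int) : Decidable (D_bingo_turn N T A) := by
  unfold D_bingo_turn; infer_instance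

def Spec_bingo_turn (N : Int) (T : Int) (A : List Int) (out : Int) : Prop := ¬ D_bingo_turn N T A → out = bingo_turn_alt N T A
instance (N : Int) (T : Int) (A : List Int) (out : Int) : Decidable (Spec_bingo_turn N T A out) := by unfold Spec_bingo_turn; infer_instance

def pvDiffWitness_bingo_turn : Int × Int × List Int := (0, 1, [5])
def pvDiffWitnessOut_bingo_turn : Int × Int := (1, -1)

-- ===== CLAIM (what is proved, stated in full; the proofs are below) =====
def Claim_unchanged_bingo_turn : Prop := ∀ (N : Int) (T : Int) (A : List Int), Dom_bingo_turn N T A → Pre_bingo_turn N T A → Spec_bingo_turn N T A (bingo_turn N T A)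
def Claim_changed_bingo_turn : Prop := Dom_bingo_turn (pvDiffWitness_bingo_turn.1) (pvDiffWitness_bingo_turn.2.1) (pvDiffWitness_bingo_turn.2.2) ∧ Pre_bingo_turn (pvDiffWitness_bingo_turn.1) (pvDiffWitness_bingo_turn.2.1) (pvDiffWitness_bingo_turn.2.2) ∧ D_bingo_turn (pvDiffWitness_bingo_turn.1) (pvDiffWitness_bingo_turn.2.1) (pvDiffWitness_bingo_turn.2.2) ∧ bingo_turn (pvDiffWitness_bingo_turn.1) (pvDiffWitness_bingo_turn.2.1) (pvDiffWitness_bingo_turn.2.2) = pvDiffWitnessOut_bingo_turn.1 ∧ bingo_turn_alt (pvDiffWitness_bingo_turn.1) (pvDiffWitness_bingo_turn.2.1) (pvDiffWitness_bingo_turn.2.2) = pvDiffWitnessOut_bingo_turn.2 ∧ pvDiffWitnessOut_bingo_turn.1 ≠ pvDiffWitnessOut_bingo_turn.2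
def Claim_exact_bingo_turn : Prop := ∀ (N : Int) (T : Int) (A : List Int), Dom_bingo_turn N T A → Pre_bingo_turn N T A → D_bingo_turn N T A → bingo_turn N T A ≠ bingo_turn_alt N T A

-- ===== LEMMAS AND PROOFS =====

-- the board A builds, as a named term
def boardL (n : Nat) : List (List Int) :=
  (PySem.List.pyRange 0 (n : Int) 1).map (fun i =>
    (PySem.List.pyRange 0 (n : Int) 1).map (fun j => i * (n : Int) + j + 1))

-- a marked cell, read totally
def cell (marks : List (List Bool)) (i j : Nat) : Bool := (marks.getD i []).getD j false

-- the invariant tying A's marks matrix to B's counters and seen-set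
def StInv (n : Nat) (marks : List (List Bool)) (rows cols : List Int)
    (diag anti : Int) (seen : PySem.Set Int) : Prop :=
  marks.length = n ∧ (∀ r ∈ marks, r.length = n) ∧
  rows.length = n ∧ cols.length = n ∧
  (∀ i j : Nat, i < n → j < n →
      (cell marks i j = true ↔ ((i : Int) * n + j + 1) ∈ seen)) ∧
  (∀ x ∈ seen, 1 ≤ x ∧ x ≤ (n : Int) * n) ∧
  (∀ i : Nat, i < n → rows.getD i 0 =
      (((List.range n).countP (fun j => cell marks i j)) : Int)) ∧
  (∀ j : Nat, j < n → cols.getD j 0 =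
      (((List.range n).countP (fun i => cell marks i j)) : Int)) ∧
  diag = (((List.range n).countP (fun i => cell marks i i)) : Int) ∧
  anti = (((List.range n).countP (fun i => cell marks i (n - 1 - i))) : Int) ∧
  checkBingoA (n : Int) marks = false

-- generic: a fold whose step never changes the accumulator
lemma foldl_fix {α β : Type} (L : List α) (g : β → α → β) (m : β)
    (h : ∀ (b : β), ∀ x ∈ L, g b x = b) : L.foldl g m = m := by
  induction L generalizing m with
  | nil => rfl
  | cons a l ih =>
      rw [List.foldl_cons, h m a List.mem_cons_self]
      exact ih m (fun b x hx => h b x (List.mem_cons_of_mem _ hx))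

-- a fold over range(a, b) whose step acts only at the single index k
lemma foldl_range_single {β : Type} (a b k : Int) (hak : a ≤ k) (hkb : k < b)
    (g : β → Int → β) (m : β)
    (hfix : ∀ (c : β) (x : Int), a ≤ x → x < b → x ≠ k → g c x = c) :
    (PySem.List.pyRange a b 1).foldl g m = g m k := by
  rw [PySem.List.pyRange_one_append a k b hak (by omega), List.foldl_append,
    PySem.List.pyRange_one_cons hkb, List.foldl_cons]
  rw [foldl_fix _ _ m (fun c x hx => by
    obtain ⟨h1, h2⟩ := PySem.List.mem_pyRange_one.mp hx
    exact hfix c x h1 (by omega) (by omega))]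
  apply foldl_fix
  intro c x hx
  obtain ⟨h1, h2⟩ := PySem.List.mem_pyRange_one.mp hx
  exact hfix c x (by omega) h2 (by omega)

lemma getD_set_self {α : Type} (l : List α) (i : Nat) (v d : α) (h : i < l.length) :
    (l.set i v).getD i d = v := by
  rw [List.getD_eq_getElem _ _ (by simpa using h)]
  simp

lemma getD_set_ne {α : Type} (l : List α) (i j : Nat) (v d : α) (h : i ≠ j) :
    (l.set i v).getD j d = l.getD j d := by
  by_cases hj : j < l.length
  · rw [List.getD_eq_getElem _ _ (by simpa using hj), List.getD_eq_getElem _ _ hj,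
      List.getElem_set_ne h]
  · rw [List.getD_eq_default _ _ (by simpa using not_lt.mp hj),
      List.getD_eq_default _ _ (not_lt.mp hj)]

lemma board_cell (n : Nat) (i j : Int) (h0i : 0 ≤ i) (hi : i < (n : Int))
    (h0j : 0 ≤ j) (hj : j < (n : Int)) :
    PySem.List.pyGetD (PySem.List.pyGetD (boardL n) i []) j 0 = i * (n : Int) + j + 1 := by
  unfold boardL
  rw [PySem.List.pyGetD_map_pyRange_of_nonneg _ _ _ _ h0i hi]
  rw [PySem.List.pyGetD_map_pyRange_of_nonneg _ _ _ _ h0j hj]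

lemma i0_lt (n : Nat) (hn : 1 ≤ n) (num : Int) (h1 : 1 ≤ num) (h2 : num ≤ (n : Int) * n) :
    (num - 1).toNat / n < n := by
  have hm : (num - 1).toNat < n * n := by
    have hc : ((n : Int) * n) = ((n * n : Nat) : Int) := by push_cast; ring
    omega
  exact Nat.div_lt_iff_lt_mul (by omega) |>.mpr hm

lemma j0_lt (n : Nat) (hn : 1 ≤ n) (num : Int) : (num - 1).toNat % n < n :=
  Nat.mod_lt _ (by omega)

lemma i0j0_id (n : Nat) (_hn : 1 ≤ n) (num : Int) (h1 : 1 ≤ num) :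
    (((num - 1).toNat / n : Nat) : Int) * n + (((num - 1).toNat % n : Nat) : Int) + 1 = num := by
  push_cast [Int.toNat_of_nonneg (show (0 : Int) ≤ num - 1 by omega)]
  have h := Int.mul_ediv_add_emod (num - 1) (n : Int)
  linarith [h, mul_comm ((n : Int)) ((num - 1) / (n : Int))]

lemma cellnum_eq (n : Nat) (hn : 1 ≤ n) (num : Int) (h1 : 1 ≤ num) (_h2 : num ≤ (n : Int) * n)
    (i j : Int) (h0i : 0 ≤ i) (hi : i < (n : Int)) (h0j : 0 ≤ j) (hj : j < (n : Int)) :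
    i * (n : Int) + j + 1 = num ↔
      (i = (((num - 1).toNat / n : Nat) : Int) ∧ j = (((num - 1).toNat % n : Nat) : Int)) := by
  constructor
  · intro h
    have ha : i = ((i.toNat : Nat) : Int) := by omega
    have hb : j = ((j.toNat : Nat) : Int) := by omega
    have h5 : ((i.toNat : Nat) : Int) * n + ((j.toNat : Nat) : Int) = num - 1 := by
      rw [← ha, ← hb]; linarith [h]
    have h7 : (((num - 1).toNat : Nat) : Int) = num - 1 := by omega
    have h6 : ((j.toNat + n * i.toNat : Nat) : Int) = (((num - 1).toNat : Nat) : Int) := by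
      push_cast
      rw [h7]
      linarith [h5, mul_comm ((n : Nat) : Int) ((i.toNat : Nat) : Int)]
    have hnat : j.toNat + n * i.toNat = (num - 1).toNat := by exact_mod_cast h6
    have hblt : j.toNat < n := by omega
    have hu := (Nat.div_mod_unique (a := (num - 1).toNat) (b := n) (d := i.toNat)
      (c := j.toNat) (by omega)).mpr ⟨hnat, hblt⟩
    constructor
    · rw [ha, hu.1]
    · rw [hb, hu.2]
  · rintro ⟨rfl, rfl⟩
    exact i0j0_id n hn num h1

lemma markA_skip (n : Nat) (hn : 1 ≤ n) (num : Int)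
    (hnum : ¬(1 ≤ num ∧ num ≤ (n : Int) * n)) (m : List (List Bool)) :
    markA (n : Int) (boardL n) num m = m := by
  apply foldl_fix
  intro b i hi
  apply foldl_fix
  intro b' j hj
  obtain ⟨h0i, hi2⟩ := PySem.List.mem_pyRange_one.mp hi
  obtain ⟨h0j, hj2⟩ := PySem.List.mem_pyRange_one.mp hj
  rw [board_cell n i j h0i hi2 h0j hj2]
  have hub : i * (n : Int) + j + 1 ≤ (n : Int) * n := by
    have h3 : i * (n : Int) ≤ ((n : Int) - 1) * n :=
      mul_le_mul_of_nonneg_right (by omega) (by omega)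
    have h4 : ((n : Int) - 1) * n = (n : Int) * n - n := by ring
    omega
  have hlb : 1 ≤ i * (n : Int) + j + 1 := by
    have := mul_nonneg h0i (show (0 : Int) ≤ n by omega)
    omega
  have hne : i * (n : Int) + j + 1 ≠ num := fun hc => hnum (hc ▸ ⟨hlb, hub⟩)
  simp [hne]

lemma markA_hit (n : Nat) (hn : 1 ≤ n) (num : Int)
    (h1 : 1 ≤ num) (h2 : num ≤ (n : Int) * n) (m : List (List Bool)) :
    markA (n : Int) (boardL n) num m
      = m.set ((num - 1).toNat / n)
          ((m.getD ((num - 1).toNat / n) []).set ((num - 1).toNat % n) true) := by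
  have hi0 : (num - 1).toNat / n < n := i0_lt n hn num h1 h2
  have hj0 : (num - 1).toNat % n < n := j0_lt n hn num
  set i0 : Nat := (num - 1).toNat / n with hi0def
  set j0 : Nat := (num - 1).toNat % n with hj0def
  have hkey : ∀ i j : Int, 0 ≤ i → i < (n : Int) → 0 ≤ j → j < (n : Int) →
      (i * (n : Int) + j + 1 = num ↔ (i = (i0 : Int) ∧ j = (j0 : Int))) :=
    fun i j a b c d => cellnum_eq n hn num h1 h2 i j a b c d
  have hinner := foldl_range_single (β := List (List Bool)) 0 (n : Int) (j0 : Int)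
    (Int.natCast_nonneg _) (by exact_mod_cast hj0)
    (fun m j =>
      if PySem.List.pyGetD (PySem.List.pyGetD (boardL n) ((i0 : Nat) : Int) []) j 0 == num then
        PySem.List.pySetD m ((i0 : Nat) : Int)
          (PySem.List.pySetD (PySem.List.pyGetD m ((i0 : Nat) : Int) []) j true)
      else m) m
    (by
      intro c x hx1 hx2 hxne
      have hb := board_cell n ((i0 : Nat) : Int) x (Int.natCast_nonneg _)
        (by exact_mod_cast hi0) hx1 hx2
      have hne : ((i0 : Nat) : Int) * (n : Int) + x + 1 ≠ num := by
        intro hc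
        exact hxne ((hkey _ x (Int.natCast_nonneg _) (by exact_mod_cast hi0) hx1 hx2).mp hc).2
      have hbeq : (PySem.List.pyGetD (PySem.List.pyGetD (boardL n) ((i0 : Nat) : Int) []) x 0
          == num) = false := by
        rw [hb]
        simp [hne]
      simp only [hbeq]
      simp)
  have houter := foldl_range_single (β := List (List Bool)) 0 (n : Int) (i0 : Int)
    (Int.natCast_nonneg _) (by exact_mod_cast hi0)
    (fun m i =>
      (PySem.List.pyRange 0 (n : Int) 1).foldl (fun m j =>
        if PySem.List.pyGetD (PySem.List.pyGetD (boardL n) i []) j 0 == num then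
          PySem.List.pySetD m i (PySem.List.pySetD (PySem.List.pyGetD m i []) j true)
        else m) m) m
    (by
      intro c x hx1 hx2 hxne
      show (PySem.List.pyRange 0 (n : Int) 1).foldl _ c = c
      apply foldl_fix
      intro b' j hj
      obtain ⟨h0j, hj2⟩ := PySem.List.mem_pyRange_one.mp hj
      have hb := board_cell n x j hx1 hx2 h0j hj2
      have hne : x * (n : Int) + j + 1 ≠ num := by
        intro hc
        exact hxne ((hkey x j hx1 hx2 h0j hj2).mp hc).1
      have hbeq : (PySem.List.pyGetD (PySem.List.pyGetD (boardL n) x []) j 0 == num) = false := by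
        rw [hb]
        simp [hne]
      simp only [hbeq]
      simp)
  unfold markA
  refine houter.trans ?_
  refine hinner.trans ?_
  show (if PySem.List.pyGetD (PySem.List.pyGetD (boardL n) ((i0 : Nat) : Int) [])
          ((j0 : Nat) : Int) 0 == num then
      PySem.List.pySetD m ((i0 : Nat) : Int)
        (PySem.List.pySetD (PySem.List.pyGetD m ((i0 : Nat) : Int) []) ((j0 : Nat) : Int) true)
    else m) = _
  rw [board_cell n ((i0 : Nat) : Int) ((j0 : Nat) : Int) (Int.natCast_nonneg _)
    (by exact_mod_cast hi0) (Int.natCast_nonneg _) (by exact_mod_cast hj0)]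
  have heq : ((i0 : Nat) : Int) * (n : Int) + ((j0 : Nat) : Int) + 1 = num :=
    (hkey _ _ (Int.natCast_nonneg _) (by exact_mod_cast hi0) (Int.natCast_nonneg _)
      (by exact_mod_cast hj0)).mpr ⟨rfl, rfl⟩
  rw [if_pos (by simpa using heq)]
  rw [PySem.List.pyGetD_natCast, PySem.List.pySetD_natCast, PySem.List.pySetD_natCast]

lemma cell_set_eq (m : List (List Bool)) (n i0 j0 : Nat) (hlen : m.length = n)
    (hrows : ∀ r ∈ m, r.length = n) (hi0 : i0 < n) (hj0 : j0 < n) (i j : Nat) :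
    cell (m.set i0 ((m.getD i0 []).set j0 true)) i j
      = if i = i0 ∧ j = j0 then true else cell m i j := by
  have hi0' : i0 < m.length := by omega
  have hrowlen : (m.getD i0 []).length = n := by
    rw [List.getD_eq_getElem _ _ hi0']
    exact hrows _ (List.getElem_mem _)
  unfold cell
  by_cases hii : i = i0
  · subst hii
    rw [getD_set_self _ _ _ _ hi0']
    by_cases hjj : j = j0
    · subst hjj
      rw [getD_set_self _ _ _ _ (by omega)]
      simp
    · rw [getD_set_ne _ _ _ _ _ (fun h => hjj h.symm)]
      simp [hjj]
  · rw [getD_set_ne _ _ _ _ _ (fun h => hii h.symm)]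
    simp [hii]

lemma countP_range_flip (n k : Nat) (p q : Nat → Bool) (hk : k < n)
    (hagree : ∀ i, i ≠ k → q i = p i) (hp : p k = false) (hq : q k = true) :
    (List.range n).countP q = (List.range n).countP p + 1 := by
  induction n with
  | zero => omega
  | succ m ih =>
      rw [List.range_succ, List.countP_append, List.countP_append]
      by_cases hkm : k = m
      · subst hkm
        have hcongr : (List.range k).countP q = (List.range k).countP p :=
          List.countP_congr (fun x hx => by
            rw [hagree x (by simp at hx; omega)])
        simp [hp, hq, hcongr]
      · have hih := ih (by omega)
        have hlast : List.countP q [m] = List.countP p [m] := by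
          simp [List.countP_cons, hagree m (Ne.symm hkm)]
        omega

lemma full_iff_countP (n : Nat) (p : Nat → Bool) :
    (List.range n).countP p = n ↔ ∀ i < n, p i = true := by
  have h := @List.countP_eq_length _ (List.range n) p
  simp only [List.length_range, List.mem_range] at h
  exact h

lemma condRow_iff (n : Nat) (marks : List (List Bool)) (hlen : marks.length = n)
    (hrows : ∀ r ∈ marks, r.length = n) :
    (marks.any (fun row => row.all (fun b => b))) = true
      ↔ ∃ i < n, ∀ j < n, cell marks i j = true := by
  rw [List.any_eq_true]
  constructor
  · rintro ⟨row, hmem, hall⟩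
    rw [List.all_eq_true] at hall
    obtain ⟨i, hi, rfl⟩ := List.mem_iff_getElem.mp hmem
    have hrl : marks[i].length = n := hrows _ hmem
    refine ⟨i, by omega, fun j hj => ?_⟩
    unfold cell
    rw [List.getD_eq_getElem _ _ hi]
    rw [List.getD_eq_getElem _ _ (by omega)]
    exact hall _ (List.getElem_mem _)
  · rintro ⟨i, hi, hfull⟩
    have hi' : i < marks.length := by omega
    refine ⟨marks[i]'hi', List.getElem_mem _, ?_⟩
    have hrl : (marks[i]'hi').length = n := hrows _ (List.getElem_mem _)
    rw [List.all_eq_true]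
    intro b hb
    obtain ⟨j, hj, rfl⟩ := List.mem_iff_getElem.mp hb
    have := hfull j (by omega)
    unfold cell at this
    rw [List.getD_eq_getElem _ _ hi'] at this
    rw [List.getD_eq_getElem _ _ (by omega)] at this
    exact this

lemma condCol_iff (n : Nat) (marks : List (List Bool)) :
    ((PySem.List.pyRange 0 (n : Int) 1).any (fun col =>
      (PySem.List.pyRange 0 (n : Int) 1).all (fun row =>
        PySem.List.pyGetD (PySem.List.pyGetD marks row []) col false))) = true
      ↔ ∃ j < n, ∀ i < n, cell marks i j = true := by
  rw [PySem.List.pyRange_zero_natCast, List.any_map, List.any_eq_true]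
  constructor
  · rintro ⟨j, hj, hall⟩
    simp only [Function.comp_apply, List.all_map, List.all_eq_true] at hall
    refine ⟨j, List.mem_range.mp hj, fun i hi => ?_⟩
    have := hall i (List.mem_range.mpr hi)
    simpa [cell, PySem.List.pyGetD_natCast] using this
  · rintro ⟨j, hj, hfull⟩
    refine ⟨j, List.mem_range.mpr hj, ?_⟩
    simp only [Function.comp_apply, List.all_map, List.all_eq_true]
    intro i hi
    have := hfull i (List.mem_range.mp hi)
    simpa [cell, PySem.List.pyGetD_natCast] using this

lemma condDiag_iff (n : Nat) (marks : List (List Bool)) :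
    ((PySem.List.pyRange 0 (n : Int) 1).all (fun i =>
      PySem.List.pyGetD (PySem.List.pyGetD marks i []) i false)) = true
      ↔ ∀ i < n, cell marks i i = true := by
  rw [PySem.List.pyRange_zero_natCast, List.all_map, List.all_eq_true]
  constructor
  · intro h i hi
    have := h i (List.mem_range.mpr hi)
    simpa [cell, PySem.List.pyGetD_natCast] using this
  · intro h i hi
    have := h i (List.mem_range.mp hi)
    simpa [cell, PySem.List.pyGetD_natCast] using this

lemma condAnti_iff (n : Nat) (marks : List (List Bool)) :
    ((PySem.List.pyRange 0 (n : Int) 1).all (fun i =>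
      PySem.List.pyGetD (PySem.List.pyGetD marks i []) ((n : Int) - 1 - i) false)) = true
      ↔ ∀ i < n, cell marks i (n - 1 - i) = true := by
  rw [PySem.List.pyRange_zero_natCast, List.all_map, List.all_eq_true]
  constructor
  · intro h i hi
    have hh := h i (List.mem_range.mpr hi)
    simp only [Function.comp_apply] at hh
    have hcast : ((n : Int) - 1 - (i : Int)) = ((n - 1 - i : Nat) : Int) := by omega
    rw [hcast, PySem.List.pyGetD_natCast, PySem.List.pyGetD_natCast] at hh
    exact hh
  · intro h i hi
    have hi' := List.mem_range.mp hi
    have hh := h i hi'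
    simp only [Function.comp_apply]
    have hcast : ((n : Int) - 1 - (i : Int)) = ((n - 1 - i : Nat) : Int) := by omega
    rw [hcast, PySem.List.pyGetD_natCast, PySem.List.pyGetD_natCast]
    exact hh

lemma checkA_iff (n : Nat) (marks : List (List Bool)) (hlen : marks.length = n)
    (hrows : ∀ r ∈ marks, r.length = n) :
    (checkBingoA (n : Int) marks = true) ↔
      ((∃ i < n, ∀ j < n, cell marks i j = true) ∨
       (∃ j < n, ∀ i < n, cell marks i j = true) ∨
       (∀ i < n, cell marks i i = true) ∨
       (∀ i < n, cell marks i (n - 1 - i) = true)) := by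
  unfold checkBingoA
  rw [← condRow_iff n marks hlen hrows, ← condCol_iff n marks, ← condDiag_iff n marks,
    ← condAnti_iff n marks]
  split_ifs with h1 h2 h3 h4 <;> simp_all

lemma loop_eq (n : Nat) (hn : 1 ≤ n) (A : List Int) (turns : List Int)
    (marks : List (List Bool)) (rows cols : List Int) (diag anti : Int)
    (seen : PySem.Set Int)
    (hInv : StInv n marks rows cols diag anti seen) :
    loopA (n : Int) (boardL n) A marks turns
      = loopB (n : Int) A rows cols diag anti seen turns := by
  induction turns generalizing marks rows cols diag anti seen with
  | nil => rfl
  | cons turn rest ih =>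
    obtain ⟨hlen, hrows, hrlen, hclen, hiff, hbound, hrowc, hcolc, hdiag, hanti, hfalse⟩ := hInv
    simp only [loopA, loopB]
    set num := PySem.List.pyGetD A turn 0 with hnumdef
    by_cases hin : 1 ≤ num ∧ num ≤ (n : Int) * (n : Int)
    · obtain ⟨i0, hi0def⟩ : ∃ k : Nat, k = (num - 1).toNat / n := ⟨_, rfl⟩
      obtain ⟨j0, hj0def⟩ : ∃ k : Nat, k = (num - 1).toNat % n := ⟨_, rfl⟩
      have hi0 : i0 < n := by rw [hi0def]; exact i0_lt n hn num hin.1 hin.2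
      have hj0 : j0 < n := by rw [hj0def]; exact j0_lt n hn num
      have hid : (i0 : Int) * n + (j0 : Int) + 1 = num := by
        rw [hi0def, hj0def]; exact i0j0_id n hn num hin.1
      have hkey : ∀ i j : Int, 0 ≤ i → i < (n : Int) → 0 ≤ j → j < (n : Int) →
          (i * (n : Int) + j + 1 = num ↔ (i = (i0 : Int) ∧ j = (j0 : Int))) := by
        intro i j a b c d
        rw [hi0def, hj0def]
        exact cellnum_eq n hn num hin.1 hin.2 i j a b c d
      have hmhit : markA (n : Int) (boardL n) num marks
          = marks.set i0 ((marks.getD i0 []).set j0 true) := by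
        rw [hi0def, hj0def]
        exact markA_hit n hn num hin.1 hin.2 marks
      have hrowlen : (marks.getD i0 []).length = n := by
        rw [List.getD_eq_getElem _ _ (by omega)]
        exact hrows _ (List.getElem_mem _)
      by_cases hseen : num ∈ seen
      · -- the number was already marked: A's matrix does not change, B skips the turn
        have hcell : cell marks i0 j0 = true :=
          (hiff i0 j0 hi0 hj0).mpr (by rw [hid]; exact hseen)
        have hsame : marks.set i0 ((marks.getD i0 []).set j0 true) = marks := by
          have hgetTrue : (marks.getD i0 [])[j0]'(by omega) = true := by
            have hc := hcell
            unfold cell at hc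
            rwa [List.getD_eq_getElem _ _ (by omega)] at hc
          have hget : (marks.getD i0 []).set j0 true = marks.getD i0 [] := by
            conv_lhs => rw [← hgetTrue]
            exact List.set_getElem_self (by simpa using (by omega : j0 < (marks.getD i0 []).length))
          rw [hget, List.getD_eq_getElem _ _ (by omega)]
          exact List.set_getElem_self (by simpa using (by omega : i0 < marks.length))
        have hcf : ¬(1 ≤ num ∧ num ≤ (n : Int) * (n : Int) ∧
            PySem.Set.contains seen num = false) := by
          rintro ⟨-, -, hc⟩
          rw [(PySem.Set.contains_iff seen num).mpr hseen] at hc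
          cases hc
        rw [hmhit, hsame, if_neg (by rw [hfalse]; exact Bool.false_ne_true), if_neg hcf]
        exact ih marks rows cols diag anti seen
          ⟨hlen, hrows, hrlen, hclen, hiff, hbound, hrowc, hcolc, hdiag, hanti, hfalse⟩
      · -- a fresh mark
        have hcontains : PySem.Set.contains seen num = false := by
          rw [← Bool.not_eq_true, PySem.Set.contains_iff]; exact hseen
        have hcondT : 1 ≤ num ∧ num ≤ (n : Int) * (n : Int) ∧
            PySem.Set.contains seen num = false := ⟨hin.1, hin.2, hcontains⟩
        have hcellF : cell marks i0 j0 = false := by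
          rw [← Bool.not_eq_true, hiff i0 j0 hi0 hj0, hid]
          exact hseen
        have hfd : PySem.Int.floordiv (num - 1) (n : Int) = (i0 : Int) := by
          have hx : num - 1 = (((num - 1).toNat : Nat) : Int) := by omega
          rw [hx, PySem.Int.floordiv_natCast, hi0def]
        have hmd : PySem.Int.mod (num - 1) (n : Int) = (j0 : Int) := by
          have hx : num - 1 = (((num - 1).toNat : Nat) : Int) := by omega
          rw [hx, PySem.Int.mod_natCast, hj0def]
        rw [if_pos hcondT, hfd, hmd, hmhit]
        set marks' := marks.set i0 ((marks.getD i0 []).set j0 true) with hmarks'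
        have hlen' : marks'.length = n := by rw [hmarks', List.length_set]; exact hlen
        have hrows' : ∀ r ∈ marks', r.length = n := by
          intro r hr
          rcases List.mem_or_eq_of_mem_set hr with h | h
          · exact hrows r h
          · subst h
            rw [List.length_set]
            exact hrowlen
        have hcell' : ∀ i j : Nat, cell marks' i j
            = if i = i0 ∧ j = j0 then true else cell marks i j :=
          fun i j => cell_set_eq marks n i0 j0 hlen hrows hi0 hj0 i j
        have hrows'v : PySem.List.pyGetD (PySem.List.pySetD rows (i0 : Int)
              (PySem.List.pyGetD rows (i0 : Int) 0 + 1)) (i0 : Int) 0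
            = (((List.range n).countP (fun j => cell marks' i0 j)) : Int) := by
          rw [PySem.List.pySetD_natCast, PySem.List.pyGetD_natCast, PySem.List.pyGetD_natCast]
          rw [getD_set_self _ _ _ _ (by omega)]
          rw [hrowc i0 hi0]
          rw [countP_range_flip n j0 (fun j => cell marks i0 j) (fun j => cell marks' i0 j)
            hj0 (fun j hj => by simp only [hcell']; simp [hj]) (by simpa using hcellF)
            (by simp only [hcell']; simp)]
          push_cast
          ring
        have hcols'v : PySem.List.pyGetD (PySem.List.pySetD cols (j0 : Int)
              (PySem.List.pyGetD cols (j0 : Int) 0 + 1)) (j0 : Int) 0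
            = (((List.range n).countP (fun i => cell marks' i j0)) : Int) := by
          rw [PySem.List.pySetD_natCast, PySem.List.pyGetD_natCast, PySem.List.pyGetD_natCast]
          rw [getD_set_self _ _ _ _ (by omega)]
          rw [hcolc j0 hj0]
          rw [countP_range_flip n i0 (fun i => cell marks i j0) (fun i => cell marks' i j0)
            hi0 (fun i hi => by simp only [hcell']; simp [hi]) (by simpa using hcellF)
            (by simp only [hcell']; simp)]
          push_cast
          ring
        have hdiag'v : (if (i0 : Int) = (j0 : Int) then diag + 1 else diag)
            = (((List.range n).countP (fun i => cell marks' i i)) : Int) := by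
          by_cases hd : i0 = j0
          · rw [if_pos (by exact_mod_cast hd)]
            subst hd
            rw [hdiag]
            rw [countP_range_flip n i0 (fun i => cell marks i i) (fun i => cell marks' i i)
              hi0 (fun i hi => by simp only [hcell']; simp [hi]) (by simpa using hcellF)
              (by simp only [hcell']; simp)]
            push_cast
            ring
          · rw [if_neg (by exact_mod_cast hd)]
            rw [hdiag]
            congr 1
            apply List.countP_congr
            intro x hx
            simp only [hcell']
            have hne : ¬(x = i0 ∧ x = j0) := by rintro ⟨rfl, rfl⟩; exact hd rfl
            simp [hne]
        have hanti'v : (if (i0 : Int) + (j0 : Int) = (n : Int) - 1 then anti + 1 else anti)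
            = (((List.range n).countP (fun i => cell marks' i (n - 1 - i))) : Int) := by
          by_cases hd : i0 + j0 = n - 1
          · rw [if_pos (by omega)]
            rw [hanti]
            have hj0eq : n - 1 - i0 = j0 := by omega
            rw [countP_range_flip n i0 (fun i => cell marks i (n - 1 - i))
              (fun i => cell marks' i (n - 1 - i)) hi0
              (fun i hi => by simp only [hcell']; simp [hi]) (by simpa [hj0eq] using hcellF)
              (by simp only [hcell']; simp [hj0eq])]
            push_cast
            ring
          · rw [if_neg (by omega)]
            rw [hanti]
            congr 1
            apply List.countP_congr
            intro x hx
            simp only [hcell']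
            have hne : ¬(x = i0 ∧ n - 1 - x = j0) := by
              rintro ⟨rfl, hx2⟩
              simp only [List.mem_range] at hx
              omega
            simp [hne]
        have hfalse' : ¬((∃ i < n, ∀ j < n, cell marks i j = true) ∨
            (∃ j < n, ∀ i < n, cell marks i j = true) ∨
            (∀ i < n, cell marks i i = true) ∨
            (∀ i < n, cell marks i (n - 1 - i) = true)) := by
          rw [← checkA_iff n marks hlen hrows, hfalse]
          exact Bool.false_ne_true
        have hmain : (checkBingoA (n : Int) marks' = true)
            ↔ ((((List.range n).countP (fun j => cell marks' i0 j)) : Int) = (n : Int) ∨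
               (((List.range n).countP (fun i => cell marks' i j0)) : Int) = (n : Int) ∨
               (((List.range n).countP (fun i => cell marks' i i)) : Int) = (n : Int) ∨
               (((List.range n).countP (fun i => cell marks' i (n - 1 - i))) : Int) = (n : Int)) := by
          rw [checkA_iff n marks' hlen' hrows']
          have hcnt : ∀ p : Nat → Bool, ((((List.range n).countP p : Nat)) : Int) = (n : Int)
              ↔ (List.range n).countP p = n := by
            intro p
            constructor
            · intro h; exact_mod_cast h
            · intro h; exact_mod_cast h
          rw [hcnt, hcnt, hcnt, hcnt, full_iff_countP, full_iff_countP, full_iff_countP,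
            full_iff_countP]
          constructor
          · rintro (⟨i, hi, hfull⟩ | ⟨j, hj, hfull⟩ | hfull | hfull)
            · by_cases hii : i = i0
              · subst hii; exact Or.inl hfull
              · exact absurd (Or.inl ⟨i, hi, fun j hj => by
                  have hv := hfull j hj
                  simp only [hcell'] at hv
                  simpa [hii] using hv⟩) hfalse'
            · by_cases hjj : j = j0
              · subst hjj; exact Or.inr (Or.inl hfull)
              · exact absurd (Or.inr (Or.inl ⟨j, hj, fun i hi => by
                  have hv := hfull i hi
                  simp only [hcell'] at hv
                  simpa [hjj] using hv⟩)) hfalse'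
            · exact Or.inr (Or.inr (Or.inl hfull))
            · exact Or.inr (Or.inr (Or.inr hfull))
          · rintro (hfull | hfull | hfull | hfull)
            · exact Or.inl ⟨i0, hi0, hfull⟩
            · exact Or.inr (Or.inl ⟨j0, hj0, hfull⟩)
            · exact Or.inr (Or.inr (Or.inl hfull))
            · exact Or.inr (Or.inr (Or.inr hfull))
        rw [hrows'v, hcols'v, hdiag'v, hanti'v]
        by_cases hB : (((List.range n).countP (fun j => cell marks' i0 j)) : Int) = (n : Int) ∨
            (((List.range n).countP (fun i => cell marks' i j0)) : Int) = (n : Int) ∨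
            (((List.range n).countP (fun i => cell marks' i i)) : Int) = (n : Int) ∨
            (((List.range n).countP (fun i => cell marks' i (n - 1 - i))) : Int) = (n : Int)
        · rw [if_pos (hmain.mpr hB), if_pos hB]
        · rw [if_neg (fun h => hB (hmain.mp h)), if_neg hB]
          apply ih
          refine ⟨hlen', hrows', ?_, ?_, ?_, ?_, ?_, ?_, rfl, rfl, ?_⟩
          · rw [PySem.List.pySetD_natCast, List.length_set]; exact hrlen
          · rw [PySem.List.pySetD_natCast, List.length_set]; exact hclen
          · intro i j hi hj
            rw [hcell', PySem.Set.mem_add]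
            by_cases hij : i = i0 ∧ j = j0
            · obtain ⟨rfl, rfl⟩ := hij
              simp [hid]
            · rw [if_neg hij]
              rw [hiff i j hi hj]
              constructor
              · exact fun h => Or.inl h
              · rintro (h | h)
                · exact h
                · exfalso
                  apply hij
                  have hc := (hkey (i : Int) (j : Int)
                    (Int.natCast_nonneg _) (by exact_mod_cast hi) (Int.natCast_nonneg _)
                    (by exact_mod_cast hj)).mp h
                  exact ⟨by exact_mod_cast hc.1, by exact_mod_cast hc.2⟩
          · intro x hx
            rw [PySem.Set.mem_add] at hx
            rcases hx with h | h
            · exact hbound x h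
            · subst h; exact ⟨hin.1, hin.2⟩
          · intro i hi
            by_cases hii : i = i0
            · rw [hii]
              rw [← PySem.List.pyGetD_natCast (PySem.List.pySetD rows ((i0 : Nat) : Int)
                (PySem.List.pyGetD rows ((i0 : Nat) : Int) 0 + 1)) i0 0]
              exact hrows'v
            · rw [PySem.List.pySetD_natCast, getD_set_ne _ _ _ _ _ (fun h => hii h.symm)]
              rw [hrowc i hi]
              congr 1
              apply List.countP_congr
              intro x hx
              simp only [hcell']
              simp [hii]
          · intro j hj
            by_cases hjj : j = j0
            · rw [hjj]
              rw [← PySem.List.pyGetD_natCast (PySem.List.pySetD cols ((j0 : Nat) : Int)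
                (PySem.List.pyGetD cols ((j0 : Nat) : Int) 0 + 1)) j0 0]
              exact hcols'v
            · rw [PySem.List.pySetD_natCast, getD_set_ne _ _ _ _ _ (fun h => hjj h.symm)]
              rw [hcolc j hj]
              congr 1
              apply List.countP_congr
              intro x hx
              simp only [hcell']
              have hne : ¬(x = i0 ∧ j = j0) := fun h => hjj h.2
              simp [hne]
          · rw [← Bool.not_eq_true]
            exact fun h => hB (hmain.mp h)
    · -- the drawn number is not on the board: both sides keep their state
      have hmA : markA (n : Int) (boardL n) num marks = marks := markA_skip n hn num hin marks
      rw [hmA, if_neg (by rw [hfalse]; exact Bool.false_ne_true)]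
      rw [if_neg (fun hc => hin ⟨hc.1, hc.2.1⟩)]
      exact ih marks rows cols diag anti seen
        ⟨hlen, hrows, hrlen, hclen, hiff, hbound, hrowc, hcolc, hdiag, hanti, hfalse⟩

lemma initial_inv (n : Nat) (hn : 1 ≤ n) :
    StInv n ((PySem.List.pyRange 0 (n : Int) 1).map (fun _ => List.replicate n false))
      (List.replicate n 0) (List.replicate n 0) 0 0 PySem.Set.empty := by
  set marks0 : List (List Bool) :=
    (PySem.List.pyRange 0 (n : Int) 1).map (fun _ => List.replicate n false) with hm0
  have hlen : marks0.length = n := by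
    rw [hm0, List.length_map, PySem.List.length_pyRange_one]
    omega
  have hrows : ∀ r ∈ marks0, r.length = n := by
    intro r hr
    rw [hm0] at hr
    obtain ⟨x, -, rfl⟩ := List.mem_map.mp hr
    simp
  have hrepl : ∀ j : Nat, (List.replicate n false).getD j false = false := by
    intro j
    by_cases hj : j < n
    · rw [List.getD_eq_getElem _ _ (by simpa using hj)]
      simp
    · rw [List.getD_eq_default _ _ (by simpa using not_lt.mp hj)]
  have hcell0 : ∀ i j : Nat, cell marks0 i j = false := by
    intro i j
    unfold cell
    by_cases hi : i < n
    · have hidx : i < marks0.length := by omega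
      have hrow0 : marks0.getD i [] = List.replicate n false := by
        rw [List.getD_eq_getElem _ _ hidx]
        simp [hm0]
      rw [hrow0, hrepl j]
    · have hrow0 : marks0.getD i [] = [] := List.getD_eq_default _ _ (by omega)
      rw [hrow0]
      simp
  have hcnt0 : ∀ p : Nat → Bool, (∀ x, p x = false) → (List.range n).countP p = 0 := by
    intro p hp
    rw [List.countP_eq_zero]
    intro a ha
    simp [hp]
  refine ⟨hlen, hrows, by simp, by simp, ?_, ?_, ?_, ?_, ?_, ?_, ?_⟩
  · intro i j hi hj
    rw [hcell0]
    simp [PySem.Set.empty]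
  · intro x hx
    simp [PySem.Set.empty] at hx
  · intro i hi
    rw [List.getD_eq_getElem _ _ (by simpa using hi), List.getElem_replicate]
    rw [hcnt0 _ (fun x => hcell0 i x)]
    simp
  · intro j hj
    rw [List.getD_eq_getElem _ _ (by simpa using hj), List.getElem_replicate]
    rw [hcnt0 _ (fun x => hcell0 x j)]
    simp
  · rw [hcnt0 _ (fun x => hcell0 x x)]; simp
  · rw [hcnt0 _ (fun x => hcell0 x (n - 1 - x))]; simp
  · rw [← Bool.not_eq_true, checkA_iff n marks0 hlen hrows]
    rintro (⟨i, hi, hfull⟩ | ⟨j, hj, hfull⟩ | hfull | hfull)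
    · have := hfull 0 (by omega); rw [hcell0] at this; exact Bool.false_ne_true this
    · have := hfull 0 (by omega); rw [hcell0] at this; exact Bool.false_ne_true this
    · have := hfull 0 (by omega); rw [hcell0] at this; exact Bool.false_ne_true this
    · have := hfull 0 (by omega); rw [hcell0] at this; exact Bool.false_ne_true this

-- B's loop on an empty board never fires its counter test
lemma loopB_zero (A : List Int) (seen : PySem.Set Int) (turns : List Int) :
    loopB 0 A [] [] 0 0 seen turns = -1 := by
  induction turns generalizing seen with
  | nil => rfl
  | cons t rest ih =>
      simp only [loopB]
      rw [if_neg (by rintro ⟨h1, h2, -⟩; simp at h2; omega)]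
      exact ih seen

-- A returns 1 on the first turn of an empty board
lemma loopA_zero (N T : Int) (A : List Int) (hN : N = 0) (hT : 1 ≤ T) :
    bingo_turn N T A = 1 := by
  subst hN
  have h0 : PySem.List.pyRange 0 (0 : Int) 1 = [] := PySem.List.pyRange_one_eq_nil (by omega)
  simp only [bingo_turn, h0, List.map_nil]
  rw [PySem.List.pyRange_one_cons (by omega : (0 : Int) < T)]
  simp only [loopA]
  have hm : markA 0 [] (PySem.List.pyGetD A 0 0) [] = [] := by
    unfold markA
    rw [h0]
    rfl
  rw [hm, if_pos (by decide : checkBingoA 0 [] = true)]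
  norm_num

-- ===== VERDICT (by name: the statement is the Claim_ definition above) =====
theorem bingo_turn_spec : Claim_unchanged_bingo_turn := by
  intro N T A hDom hPre
  obtain ⟨hN0, hTA⟩ := hPre
  unfold Spec_bingo_turn
  intro hnD
  by_cases hN : 1 ≤ N
  · obtain ⟨n, rfl⟩ : ∃ n : Nat, N = (n : Int) := ⟨N.toNat, by omega⟩
    have hn : 1 ≤ n := by exact_mod_cast hN
    simp only [bingo_turn, bingo_turn_alt, Int.toNat_natCast]
    show loopA (n : Int) (boardL n) A
        ((PySem.List.pyRange 0 (n : Int) 1).map (fun _ => List.replicate n false))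
        (PySem.List.pyRange 0 T 1)
      = loopB (n : Int) A (List.replicate n 0) (List.replicate n 0) 0 0 PySem.Set.empty
        (PySem.List.pyRange 0 T 1)
    exact loop_eq n hn A (PySem.List.pyRange 0 T 1) _ _ _ 0 0 PySem.Set.empty (initial_inv n hn)
  · have hNz : N = 0 := by omega
    subst hNz
    have hT0 : T ≤ 0 := by
      by_contra h
      exact hnD ⟨rfl, by omega⟩
    have hrange : PySem.List.pyRange 0 T 1 = [] := PySem.List.pyRange_one_eq_nil (by omega)
    simp only [bingo_turn, bingo_turn_alt, hrange]
    rfl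

theorem bingo_turn_changed : Claim_changed_bingo_turn := by
  unfold Claim_changed_bingo_turn
  decide

theorem bingo_turn_tight : Claim_exact_bingo_turn := by
  intro N T A hDom hPre hD
  obtain ⟨hNz, hT⟩ := hD
  have hA1 : bingo_turn N T A = 1 := loopA_zero N T A hNz hT
  have hB1 : bingo_turn_alt N T A = -1 := by
    subst hNz
    show loopB 0 A [] [] 0 0 PySem.Set.empty (PySem.List.pyRange 0 T 1) = -1
    exact loopB_zero A PySem.Set.empty _
  rw [hA1, hB1]
  decide
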